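-- pv_equiv track=rewrite | github.com/joetache4/project-euler | 098_AnagramicSquares.py | signature
-- ===== SOURCE A (Python) =====
-- def signature(s, alphabet="abcdefghijklmnopqrstuvwxyz"):
-- 	s = str(s)
-- 	sig = []
-- 	map = {}
-- 	j = 0
-- 	for i in range(len(s)):
-- 		c = s[i]
-- 		try:
-- 			sig.append(map[c])
-- 		except:
-- 			map[c] = alphabet[j]
-- 			sig.append(alphabet[j])
-- 			j += 1
-- 	sig = "".join(sig)
-- 	return sig
-- ===== SOURCE B (Python) =====
-- def signature(s, alphabet="abcdefghijklmnopqrstuvwxyz"):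
-- 	s = str(s)
-- 	return "".join(alphabet[len(set(s[:s.index(c)]))] for c in s)
-- ===== Notes on version B (the rewrite author's own statement) =====
-- stated objective: alternative
-- what changed: A maintains a growing char-to-letter dict and a counter in one stateful loop; B maintains no mapping at all and computes each output letter by a per-character closed form: alphabet[len(set(s[:s.index(c)]))], the number of distinct characters before c's first occurrence.
import Mathlib
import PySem

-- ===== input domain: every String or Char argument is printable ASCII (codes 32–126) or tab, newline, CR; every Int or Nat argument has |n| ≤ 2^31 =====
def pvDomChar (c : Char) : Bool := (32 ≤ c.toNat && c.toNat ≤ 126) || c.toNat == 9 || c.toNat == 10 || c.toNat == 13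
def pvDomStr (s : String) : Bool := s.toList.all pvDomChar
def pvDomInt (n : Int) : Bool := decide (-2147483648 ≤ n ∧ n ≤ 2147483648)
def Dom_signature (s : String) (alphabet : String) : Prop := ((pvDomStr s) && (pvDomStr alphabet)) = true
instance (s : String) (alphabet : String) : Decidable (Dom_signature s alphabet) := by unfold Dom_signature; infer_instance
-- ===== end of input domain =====

-- B keeps no mapping at all: each output letter is the closed form
-- alphabet[len(set(s[:s.index(c)]))] — the distinct-character count before c's first occurrence
-- (objective: alternative; B trades A's dict for a per-character formula).

-- ===== PORT A =====
-- A's for-loop over s with the growing dict `map` and counter j; appending to sig becomes cons-recursion.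
-- alphabet[j] is ported as getD with a dummy default: under Pre_ the index is always in range.
def sigLoopA (alph : List Char) : List Char → PySem.Dict Char Char → Nat → List Char
  | [], _, _ => []
  | c :: t, m, j =>
    match m.get? c with
    | some v => v :: sigLoopA alph t m j
    | none => alph.getD j '?' :: sigLoopA alph t (m.insert c (alph.getD j '?')) (j + 1)

def signature (s : String) (alphabet : String) : String :=
  String.ofList (sigLoopA alphabet.toList s.toList PySem.Dict.empty 0)

-- ===== PORT B =====
-- per character c: s.index(c) → PySem.List.index? (always some, c is drawn from s);
-- set(s[:j]) → PySem.Set.ofList (take j); alphabet[k] as getD (in range under Pre_).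
def signature_alt (s : String) (alphabet : String) : String :=
  String.ofList (s.toList.map (fun c =>
    alphabet.toList.getD
      (PySem.Set.ofList (s.toList.take ((PySem.List.index? s.toList c).getD 0))).length '?'))

-- ===== PRECONDITION & SPEC =====
-- Pre_ excludes exactly the inputs with more distinct characters than the alphabet has, on which
-- the Python A raises an uncaught IndexError at alphabet[j] (B raises the same way).
def Pre_signature (s : String) (alphabet : String) : Prop :=
  (PySem.List.dedup s.toList).length ≤ alphabet.toList.length
instance (s : String) (alphabet : String) : Decidable (Pre_signature s alphabet) := by
  unfold Pre_signature; infer_instance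

def pvWitness_signature : String × String := ("hello world", "abcdefghijklmnopqrstuvwxyz")

def Spec_signature (s : String) (alphabet : String) (out : String) : Prop := out = signature_alt s alphabet
instance (s : String) (alphabet : String) (out : String) : Decidable (Spec_signature s alphabet out) := by
  unfold Spec_signature; infer_instance

-- ===== CLAIM (what is proved, stated in full; the proofs are below) =====
def Claim_equal_signature : Prop := ∀ (s : String) (alphabet : String), Dom_signature s alphabet → Pre_signature s alphabet → Spec_signature s alphabet (signature s alphabet)

-- ===== LEMMAS AND PROOFS =====

-- The seen list only grows (as a prefix) under Set.update.
theorem prefix_set_update (d : List Char) (t : List Char) : d <+: PySem.Set.update d t := by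
  induction t generalizing d with
  | nil => simp [PySem.Set.update_nil]
  | cons c t ih =>
    rw [PySem.Set.update_cons]
    refine List.IsPrefix.trans ?_ (ih (PySem.Set.add d c))
    rw [PySem.Set.add_eq_ite]
    split
    · exact List.prefix_refl d
    · exact List.prefix_append d [c]

-- Loop invariant for A: with seen list d (nodup), counter j = d.length and the dict exactly the
-- table of d, A's remaining loop output translates each char to the alphabet letter at its index
-- in the final distinct list.
theorem sigLoopA_eq (alph : List Char) (t : List Char) :
    ∀ (d : List Char) (m : PySem.Dict Char Char), d.Nodup →
    (∀ c : Char, m.get? c = if c ∈ d then some (alph.getD (d.idxOf c) '?') else none) →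
    sigLoopA alph t m d.length = t.map (fun c => alph.getD ((PySem.Set.update d t).idxOf c) '?') := by
  induction t with
  | nil => intro d m _ _; simp [sigLoopA, PySem.Set.update_nil]
  | cons c t ih =>
    intro d m hnd hm
    rw [PySem.Set.update_cons]
    by_cases hc : c ∈ d
    · rw [PySem.Set.add_of_mem hc]
      have hget := hm c
      rw [if_pos hc] at hget
      simp only [sigLoopA, hget, List.map_cons]
      rw [← (prefix_set_update d t).idxOf_eq_of_mem hc, ih d m hnd hm]
    · rw [PySem.Set.add_of_not_mem hc]
      have hget := hm c
      rw [if_neg hc] at hget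
      simp only [sigLoopA, hget, List.map_cons]
      have hnd' : (d ++ [c]).Nodup := by
        simp only [List.nodup_append, List.nodup_singleton, true_and, hnd]
        intro a ha b hb
        simp only [List.mem_singleton] at hb
        subst hb
        intro h
        exact hc (h ▸ ha)
      have hidxc : (d ++ [c]).idxOf c = d.length := by
        rw [List.idxOf_append_of_notMem hc]; simp
      have hcm : c ∈ d ++ [c] := by simp
      rw [← (prefix_set_update (d ++ [c]) t).idxOf_eq_of_mem hcm, hidxc,
        show d.length + 1 = (d ++ [c]).length by simp,
        ih (d ++ [c]) _ hnd' ?_]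
      intro c'
      by_cases hcc : c' = c
      · subst hcc
        rw [PySem.Dict.get?_insert_self, if_pos hcm, hidxc]
      · rw [PySem.Dict.get?_insert_of_ne _ _ hcc, hm c']
        by_cases hcd : c' ∈ d
        · rw [if_pos hcd, if_pos (by simp [hcd]),
            ← (List.prefix_append d [c]).idxOf_eq_of_mem hcd]
        · rw [if_neg hcd, if_neg (by simp [hcd, hcc])]

-- B's closed form: for c ∈ l not yet seen, c's index in the final distinct list equals the number
-- of distinct characters accumulated over the prefix strictly before c's first occurrence.
theorem idx_update_eq_len_take (l : List Char) (c : Char) (hc : c ∈ l) :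
    ∀ d : List Char, c ∉ d →
    (PySem.Set.update d l).idxOf c = (PySem.Set.update d (l.take (l.idxOf c))).length := by
  induction l with
  | nil => cases hc
  | cons a t ih =>
    intro d hd
    by_cases hca : c = a
    · subst hca
      rw [List.idxOf_cons_self, List.take_zero, PySem.Set.update_nil,
        PySem.Set.update_cons, PySem.Set.add_of_not_mem hd]
      have hcm : c ∈ d ++ [c] := by simp
      rw [← (prefix_set_update (d ++ [c]) t).idxOf_eq_of_mem hcm,
        List.idxOf_append_of_notMem hd]
      simp
    · have hct : c ∈ t := by
        rcases List.mem_cons.mp hc with h | h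
        · exact absurd h hca
        · exact h
      rw [List.idxOf_cons_ne _ (fun h => hca h.symm), PySem.Set.update_cons]
      have : (a :: t).take (t.idxOf c + 1) = a :: t.take (t.idxOf c) := by
        simp [List.take_succ_cons]
      rw [this, PySem.Set.update_cons]
      apply ih hct
      rw [PySem.Set.add_eq_ite]
      split
      · exact hd
      · simp [hd, hca]

-- index? returns the first index when the element is present.
theorem index?_getD_eq_idxOf (l : List Char) (c : Char) (hc : c ∈ l) :
    (PySem.List.index? l c).getD 0 = l.idxOf c := by
  induction l with
  | nil => cases hc
  | cons a t ih =>
    by_cases hca : a = c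
    · subst hca
      rw [PySem.List.index?_cons_self, List.idxOf_cons_self]
      rfl
    · have hct : c ∈ t := by
        rcases List.mem_cons.mp hc with h | h
        · exact absurd h.symm hca
        · exact h
      rw [PySem.List.index?_cons_of_ne _ hca, List.idxOf_cons_ne _ hca]
      have hsome : (PySem.List.index? t c).isSome := (Iff.mpr (PySem.List.index?_isSome_iff t c) hct)
      rcases Option.isSome_iff_exists.mp hsome with ⟨k, hk⟩
      rw [hk, Option.map_some, Option.getD_some]
      have := ih hct
      rw [hk, Option.getD_some] at this
      omega

-- ===== VERDICT (by name: the statement is the Claim_ definition above) =====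
theorem signature_spec : Claim_equal_signature := by
  intro s alphabet _ _
  unfold Spec_signature signature signature_alt
  have h0 : sigLoopA alphabet.toList s.toList PySem.Dict.empty 0
      = s.toList.map (fun c => alphabet.toList.getD ((PySem.Set.update [] s.toList).idxOf c) '?') := by
    have := sigLoopA_eq alphabet.toList s.toList [] PySem.Dict.empty List.nodup_nil
      (by intro c; simp [PySem.Dict.get?_empty])
    simpa using this
  rw [h0]
  congr 1
  apply List.map_congr_left
  intro c hc
  rw [index?_getD_eq_idxOf s.toList c hc,
    idx_update_eq_len_take s.toList c hc [] (List.not_mem_nil),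
    show PySem.Set.ofList (s.toList.take (s.toList.idxOf c))
        = PySem.Set.update [] (s.toList.take (s.toList.idxOf c)) from rfl]
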